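-- pv_equiv track=rewrite | github.com/gaston-lm/TP1_TD- | peculiar.py | cant_peculiares_entre
-- ===== SOURCE A (Python) =====
-- def es_par (n:int) -> bool:
--     ''' Determina si un numero es par.
--         Pre: n pertenece a los enteros.
--         Post: Devuelve True si n es par y False si es impar.
--     '''
--     vr:bool = n % 2 == 0
--     return vr
--
-- def multiplo_de_22(n:int) -> bool:
--     ''' Determina si n es un número múltiplo de 22
--         Pre: n pertenece a los enteros.
--         Post: vr equivale a si n es múltiplo de 22.
--     '''
--     vr = n % 22 == 0
--     return vr
--
-- def misma_paridad (n:int, m:int) -> bool: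
--     ''' Determina si tienen la misma paridad.
--         Pre: n, m  pertenecen a L (donde L = naturales + 0)
--         Post: vr equivale a que ambos números son pares o ambos impares
--     '''
--     vr:bool = es_par(n) and es_par(m) or not es_par(n) and not es_par(m)
--     return vr
--
-- def alterna_paridad(n:int) -> bool:
--     ''' Determina si los dígitos de n alternan su paridad.
--         Pre: n pertenece a L (donde L = naturales + 0).
--         Post: vr equivale a que los dígitos de n alternen su paridad.
--     '''
--     i:int = 1
--     string_n:str = str(n)
--     vr:bool = True
--
--     # (A)
--     while i < len(string_n):
--         # (B)
--         vr = vr and not misma_paridad(int(string_n[i-1]),int(string_n[i]))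
--         i = i + 1
--         # (C)
--     # (D)
--     return vr
--
-- def es_peculiar(n:int) -> bool:
--     ''' Determina si n es lo que se considera un numero "peculiar"
--         Pre: n pertenece a L (donde L = naturales + 0)
--         Post: vr equivale a si n es peculiar si y solo si n es multiplo de 22
--         y sus digitos alternan paridad.
--     '''
--     vr:bool = multiplo_de_22(n) and alterna_paridad(n)
--     return vr
--
-- def cant_peculiares_entre(n:int, m:int) -> int:
--     ''' Determina la cantidad de números peculiares entre n y m
--         Pre: n, m  pertenecen a L (donde L = naturales + 0) y n < m
--         Post: vr equivale a la cantidad de números peculiares en el intervalo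
--         cerrado [n, m]
--     '''
--     vr:int = 0
--     i:int = n
--     # (A)
--     while i <= m:
--         # (B)
--         if es_peculiar(i):
--             vr = vr + 1
--         i = i + 1
--         # (C)
--     # (D)
--     return vr
-- ===== SOURCE B (Python) =====
-- def cant_peculiares_entre(n: int, m: int) -> int:
--     ''' Same count, but steps only through the multiples of 22 in [n, m]
--         and checks digit-parity alternation on adjacent pairs directly. '''
--     start = -(-n // 22) * 22          # smallest multiple of 22 >= n
--     count = 0
--     for v in range(start, m + 1, 22):
--         s = str(v)
--         if all(int(a) % 2 != int(b) % 2 for a, b in zip(s, s[1:])):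
--             count += 1
--     return count
-- ===== Notes on version B (the rewrite author's own statement) =====
-- stated objective: faster
-- what changed: B iterates only over the multiples of 22 in [n,m] (start computed by ceiling division) and tests digit-parity alternation with all() over adjacent zipped digit pairs, instead of A's per-integer scan with an accumulated boolean while-loop.
import Mathlib
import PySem

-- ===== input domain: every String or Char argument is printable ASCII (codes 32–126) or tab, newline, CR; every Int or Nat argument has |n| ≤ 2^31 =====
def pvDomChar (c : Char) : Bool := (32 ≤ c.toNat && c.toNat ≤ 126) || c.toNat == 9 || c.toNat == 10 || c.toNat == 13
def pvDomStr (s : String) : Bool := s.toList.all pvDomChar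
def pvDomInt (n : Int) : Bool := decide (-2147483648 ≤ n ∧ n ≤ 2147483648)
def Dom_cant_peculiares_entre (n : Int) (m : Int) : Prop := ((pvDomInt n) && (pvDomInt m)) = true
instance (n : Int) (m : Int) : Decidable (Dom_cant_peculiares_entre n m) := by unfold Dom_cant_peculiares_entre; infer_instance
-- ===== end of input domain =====

-- B steps only through the multiples of 22 (O((m-n)/22 · log m) instead of visiting every
-- integer in [n,m]) and checks parity alternation on adjacent digit pairs with all/zip.

-- ===== PORT A =====
def es_par (n : Int) : Bool := decide (PySem.Int.mod n 2 = 0)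

def multiplo_de_22 (n : Int) : Bool := decide (PySem.Int.mod n 22 = 0)

def misma_paridad (n : Int) (m : Int) : Bool :=
  (es_par n && es_par m) || (!es_par n && !es_par m)

-- int(s[i]); the getD 0 marks where Python raises ValueError (no digit there) — excluded by Pre_
def pvDigAt (s : String) (i : Int) : Int :=
  ((PySem.Str.pyGet? s i).bind (fun c => PySem.Int.ofChars? [c])).getD 0

def alternaLoop (s : String) (i : Nat) (vr : Bool) : Bool :=
  if _h : i < (PySem.Str.len s).toNat then
    alternaLoop s (i + 1) (vr && ! misma_paridad (pvDigAt s ((i : Int) - 1)) (pvDigAt s (i : Int)))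
  else vr
termination_by (PySem.Str.len s).toNat - i
decreasing_by simp_all [PySem.Str.len_eq]; omega

def alterna_paridad (n : Int) : Bool := alternaLoop (PySem.Int.toStr n) 1 true

def es_peculiar (n : Int) : Bool := multiplo_de_22 n && alterna_paridad n

def cantLoop (i : Int) (m : Int) (vr : Int) : Int :=
  if _h : i ≤ m then cantLoop (i + 1) m (if es_peculiar i then vr + 1 else vr) else vr
termination_by (m + 1 - i).toNat
decreasing_by omega

def cant_peculiares_entre (n : Int) (m : Int) : Int := cantLoop n m 0

-- ===== PORT B =====
-- int(c) for a 1-char string c; the getD 0 marks where Python raises ValueError — excluded by Pre_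
def pvDig (c : Char) : Int := (PySem.Int.ofChars? [c]).getD 0

-- all(int(a) % 2 != int(b) % 2 for a, b in zip(s, s[1:]))
def pvAltPairs (v : Int) : Bool :=
  let s := PySem.Int.toStr v
  (s.toList.zip (PySem.Str.slice s (some 1) none).toList).all
    (fun p => !(decide (PySem.Int.mod (pvDig p.1) 2 = PySem.Int.mod (pvDig p.2) 2)))

def cant_peculiares_entre_alt (n : Int) (m : Int) : Int :=
  let start := -(PySem.Int.floordiv (-n) 22) * 22
  (PySem.List.pyRange start (m + 1) 22).foldl
    (fun c v => if pvAltPairs v then c + 1 else c) 0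

-- ===== PRECONDITION & SPEC =====
-- Pre_ excludes exactly the inputs on which A raises ValueError: those whose interval [n,m]
-- contains a negative multiple of 22 (str(i) then starts with '-' and int('-') raises).
def Pre_cant_peculiares_entre (n : Int) (m : Int) : Prop :=
  22 * Int.fdiv (min m (-22)) 22 < n
instance (n : Int) (m : Int) : Decidable (Pre_cant_peculiares_entre n m) := by
  unfold Pre_cant_peculiares_entre; infer_instance

def pvWitness_cant_peculiares_entre : Int × Int := (0, 100)

def Spec_cant_peculiares_entre (n : Int) (m : Int) (out : Int) : Prop := out = cant_peculiares_entre_alt n m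
instance (n : Int) (m : Int) (out : Int) : Decidable (Spec_cant_peculiares_entre n m out) := by unfold Spec_cant_peculiares_entre; infer_instance

-- ===== CLAIM (what is proved, stated in full; the proofs are below) =====
def Claim_equal_cant_peculiares_entre : Prop := ∀ (n : Int) (m : Int), Dom_cant_peculiares_entre n m → Pre_cant_peculiares_entre n m → Spec_cant_peculiares_entre n m (cant_peculiares_entre n m)

-- ===== LEMMAS AND PROOFS =====

-- the pairwise-parity predicates of A and B agree on every pair of integers
lemma pred_eq (a b : Int) :
    (! misma_paridad a b) = !(decide (PySem.Int.mod a 2 = PySem.Int.mod b 2)) := by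
  have ha := PySem.Int.mod_eq_emod_of_pos (a := a) (b := 2) (by norm_num)
  have hb := PySem.Int.mod_eq_emod_of_pos (a := b) (b := 2) (by norm_num)
  simp only [misma_paridad, es_par, ha, hb]
  by_cases h1 : a % 2 = 0 <;> by_cases h2 : b % 2 = 0 <;> simp [h1, h2] <;> omega

lemma alternaLoop_eq (cs : List Char) (k i : Nat) (hk : cs.length - i = k) (hi : 1 ≤ i) (vr : Bool) :
    alternaLoop (String.ofList cs) i vr
      = (vr && ((cs.drop (i - 1)).zip (cs.drop i)).all
          (fun p => !(decide (PySem.Int.mod (pvDig p.1) 2 = PySem.Int.mod (pvDig p.2) 2)))) := by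
  induction k generalizing i vr with
  | zero =>
    have hlen : cs.length ≤ i := by omega
    rw [alternaLoop]
    rw [dif_neg (by simp [PySem.Str.len_eq]; omega)]
    simp [List.drop_eq_nil_of_le hlen]
  | succ k ih =>
    have hlt : i < cs.length := by omega
    rw [alternaLoop]
    rw [dif_pos (by simp [PySem.Str.len_eq]; omega)]
    rw [ih (i + 1) (by omega) (by omega)]
    have h1 : i - 1 < cs.length := by omega
    rw [List.drop_eq_getElem_cons h1, List.drop_eq_getElem_cons hlt]
    have hidx : i - 1 + 1 = i := by omega
    rw [hidx]
    have hd1 : pvDigAt (String.ofList cs) ((i : Int) - 1) = pvDig cs[i - 1] := by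
      have : ((i : Int) - 1) = ((i - 1 : Nat) : Int) := by omega
      simp [pvDigAt, pvDig, this, List.getElem?_eq_getElem h1]
    have hd0 : pvDigAt (String.ofList cs) (i : Int) = pvDig cs[i] := by
      simp [pvDigAt, pvDig, List.getElem?_eq_getElem hlt]
    rw [hd1, hd0, pred_eq, Nat.add_sub_cancel, List.zip_cons_cons, List.all_cons,
      Bool.and_assoc]

lemma alterna_eq_pairs (v : Int) : alterna_paridad v = pvAltPairs v := by
  unfold alterna_paridad pvAltPairs
  have hs : PySem.Int.toStr v = String.ofList (PySem.Int.toChars v) := by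
    rw [← PySem.Int.toList_toStr, String.ofList_toList]
  rw [hs, alternaLoop_eq (PySem.Int.toChars v) ((PySem.Int.toChars v).length - 1) 1 rfl (by omega)]
  simp [PySem.Str.slice, PySem.Chars.slice, PySem.List.slice_from_one, List.drop_one]

-- nextMult n = smallest multiple of 22 that is ≥ n (B's start)
def pvNext (i : Int) : Int := -(PySem.Int.floordiv (-i) 22) * 22

lemma pvNext_spec (i : Int) : i ≤ pvNext i ∧ pvNext i < i + 22 ∧ 22 ∣ pvNext i := by
  have h := (PySem.Int.neg_floordiv_neg_eq_iff_of_pos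
    (a := i) (b := 22) (q := -(PySem.Int.floordiv (-i) 22)) (by norm_num)).mp rfl
  unfold pvNext
  refine ⟨by omega, by omega, ⟨-(PySem.Int.floordiv (-i) 22), by ring⟩⟩

lemma pvNext_unique (i x : Int) (h22 : 22 ∣ x) (h1 : i ≤ x) (h2 : x < i + 22) : x = pvNext i := by
  obtain ⟨hl, hr, hd⟩ := pvNext_spec i
  omega

-- B's loop, written as step-22 recursion
def loopB (j : Int) (m : Int) (c : Int) : Int :=
  if _h : j ≤ m then loopB (j + 22) m (if pvAltPairs j then c + 1 else c) else c
termination_by (m + 1 - j).toNat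
decreasing_by omega

lemma pyRange22_cons (a b : Int) (h : a < b) :
    PySem.List.pyRange a b 22 = a :: PySem.List.pyRange (a + 22) b 22 := by
  rw [PySem.List.pyRange_of_pos a b (by norm_num),
      PySem.List.pyRange_of_pos (a + 22) b (by norm_num), if_pos h]
  have hc : ((b - a + 22 - 1) / 22).toNat
      = (if a + 22 < b then ((b - (a + 22) + 22 - 1) / 22).toNat else 0) + 1 := by
    split_ifs with h2 <;> omega
  rw [hc, List.range_succ_eq_map]
  simp only [List.map_cons, List.map_map, Nat.cast_zero, mul_zero, add_zero]
  refine congrArg (a :: ·) (List.map_congr_left fun k _ => ?_)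
  simp only [Function.comp_apply]
  push_cast
  ring

lemma pyRange22_nil (a b : Int) (h : b ≤ a) : PySem.List.pyRange a b 22 = [] := by
  rw [PySem.List.pyRange_of_pos a b (by norm_num)]
  simp [show ¬ a < b by omega]

lemma foldB_aux (m : Int) (N : Nat) : ∀ (j c : Int), (m + 1 - j).toNat ≤ N →
    (PySem.List.pyRange j (m + 1) 22).foldl (fun c v => if pvAltPairs v then c + 1 else c) c
      = loopB j m c := by
  induction N with
  | zero =>
    intro j c hN
    rw [pyRange22_nil _ _ (by omega), loopB, dif_neg (by omega)]
    rfl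
  | succ N ih =>
    intro j c hN
    by_cases hj : j ≤ m
    · rw [pyRange22_cons j (m + 1) (by omega), List.foldl_cons, loopB, dif_pos hj]
      exact ih _ _ (by omega)
    · rw [pyRange22_nil _ _ (by omega), loopB, dif_neg hj]
      rfl

lemma foldB (j m c : Int) :
    (PySem.List.pyRange j (m + 1) 22).foldl (fun c v => if pvAltPairs v then c + 1 else c) c
      = loopB j m c :=
  foldB_aux m (m + 1 - j).toNat j c le_rfl

lemma main_aux (m : Int) (N : Nat) : ∀ (i vr : Int), (m + 1 - i).toNat ≤ N →
    cantLoop i m vr = loopB (pvNext i) m vr := by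
  induction N with
  | zero =>
    intro i vr hN
    obtain ⟨h1, h2, h3⟩ := pvNext_spec i
    rw [cantLoop, dif_neg (by omega), loopB, dif_neg (by omega)]
  | succ N ih =>
    intro i vr hN
    obtain ⟨h1, h2, h3⟩ := pvNext_spec i
    by_cases hi : i ≤ m
    · rw [cantLoop, dif_pos hi]
      by_cases hdvd : (22 : Int) ∣ i
      · have hni : pvNext i = i := (pvNext_unique i i hdvd le_rfl (by omega)).symm
        have hmul : multiplo_de_22 i = true := by
          simp [multiplo_de_22, hdvd]
        have hpec : es_peculiar i = pvAltPairs i := by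
          simp [es_peculiar, hmul, alterna_eq_pairs]
        have hn1 : pvNext (i + 1) = i + 22 :=
          (pvNext_unique (i + 1) (i + 22) (by omega) (by omega) (by omega)).symm
        rw [hni, hpec, ih (i + 1) _ (by omega), hn1]
        conv_rhs => rw [loopB]
        rw [dif_pos hi]
      · have hpec : es_peculiar i = false := by
          simp [es_peculiar, multiplo_de_22, hdvd]
        have hn1 : pvNext (i + 1) = pvNext i :=
          (pvNext_unique (i + 1) (pvNext i) h3 (by omega) (by omega)).symm
        rw [hpec]
        simp only [Bool.false_eq_true, if_false]
        rw [ih (i + 1) vr (by omega), hn1]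
    · rw [cantLoop, dif_neg hi, loopB, dif_neg (by omega)]

lemma main_loop (i m vr : Int) : cantLoop i m vr = loopB (pvNext i) m vr :=
  main_aux m (m + 1 - i).toNat i vr le_rfl

-- ===== VERDICT (by name: the statement is the Claim_ definition above) =====
theorem cant_peculiares_entre_spec : Claim_equal_cant_peculiares_entre := by
  intro n m _ _
  unfold Spec_cant_peculiares_entre cant_peculiares_entre cant_peculiares_entre_alt
  rw [main_loop, ← foldB]
  rfl
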